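-- pv_equiv track=rewrite | github.com/cheery/lever | instruction_format.py | opname
-- ===== SOURCE A (Python) =====
-- def opname(value):
--     value = value >> 5
--     name = []
--     while value > 0:
--         name.append(chr((value & 31) + ord('a') - 1))
--         value >>= 5
--     name.reverse()
--     return ''.join(name)
-- ===== SOURCE B (Python) =====
-- def opname(value):
--     value >>= 5
--     if value <= 0:
--         return ''
--     n = (value.bit_length() + 4) // 5
--     return ''.join(chr(((value >> (5 * i)) & 31) + ord('a') - 1) for i in reversed(range(n)))
-- ===== Notes on version B (the rewrite author's own statement) =====
-- stated objective: simpler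
-- what changed: Replaces A's accumulate-low-digit-then-reverse while loop by computing the digit count from bit_length and emitting the base-32 letters most-significant-first in a single indexed join, with no mutable list and no reverse.
import Mathlib
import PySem

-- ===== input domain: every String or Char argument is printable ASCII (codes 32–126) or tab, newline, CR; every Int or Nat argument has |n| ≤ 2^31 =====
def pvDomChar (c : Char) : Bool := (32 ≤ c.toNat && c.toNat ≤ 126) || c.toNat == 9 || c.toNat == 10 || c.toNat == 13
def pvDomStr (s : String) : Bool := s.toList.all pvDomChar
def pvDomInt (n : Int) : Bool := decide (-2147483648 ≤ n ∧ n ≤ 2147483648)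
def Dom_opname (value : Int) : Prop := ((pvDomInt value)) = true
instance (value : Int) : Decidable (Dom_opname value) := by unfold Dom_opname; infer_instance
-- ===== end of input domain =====

-- B replaces A's accumulate-low-digits-then-reverse while loop by computing the digit
-- count from bit_length and emitting the base-32 letters most-significant-first in one
-- indexed pass (objective: simpler — no mutable list, no reverse).

-- ===== PORT A =====
-- termination helper for A's while loop: `value >>= 5` shrinks a positive value
theorem pvShiftToNat (v : Int) (h : 0 ≤ v) : (v >>> (5 : Nat)).toNat = v.toNat / 32 := by
  obtain ⟨m, rfl⟩ := Int.eq_ofNat_of_zero_le h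
  rw [← Int.natCast_shiftRight, Int.toNat_natCast, Int.toNat_natCast,
    Nat.shiftRight_eq_div_pow]

-- while value > 0: name.append(chr((value & 31) + ord('a') - 1)); value >>= 5
def opnameLoop (value : Int) (name : List Char) : List Char :=
  if h : 0 < value then
    opnameLoop (value >>> (5 : Nat))
      (name ++ [Char.ofNat ((PySem.Int.band value 31).toNat + 96)])
  else name
termination_by value.toNat
decreasing_by
  rw [pvShiftToNat value (le_of_lt h)]
  exact Nat.div_lt_self (by omega) (by norm_num)

def opname (value : Int) : String :=
  let value := value >>> (5 : Nat)
  let name := opnameLoop value []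
  String.mk name.reverse

-- ===== PORT B =====
def opname_alt (value : Int) : String :=
  let value := value >>> (5 : Nat)
  if value ≤ 0 then "" else
    let n := (PySem.Int.bitLength value + 4) / 5
    String.mk ((List.range n).reverse.map (fun i =>
      Char.ofNat ((PySem.Int.band (value >>> (5 * i : Nat)) 31).toNat + 96)))

-- ===== PRECONDITION & SPEC =====
def Spec_opname (value : Int) (out : String) : Prop := out = opname_alt value
instance (value : Int) (out : String) : Decidable (Spec_opname value out) := by unfold Spec_opname; infer_instance

-- ===== CLAIM (what is proved, stated in full; the proofs are below) =====
def Claim_equal_opname : Prop := ∀ (value : Int), Dom_opname value → Spec_opname value (opname value)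

-- ===== LEMMAS AND PROOFS =====

-- base-32 digits of m, low-to-high, as A's loop collects them
def lowD (m : Nat) : List Char :=
  if h : m = 0 then [] else Char.ofNat (m % 32 + 96) :: lowD (m / 32)
decreasing_by exact Nat.div_lt_self (Nat.pos_of_ne_zero h) (by norm_num)

theorem pvBandToNat (m : Nat) : (PySem.Int.band (m : Int) 31).toNat = m % 32 := by
  have : ((31 : Int)) = ((31 : Nat) : Int) := rfl
  rw [this, PySem.Int.band_natCast, Int.toNat_natCast]
  simpa using Nat.and_two_pow_sub_one_eq_mod m 5

theorem pvShiftCast (m k : Nat) : ((m : Int) >>> k) = ((m >>> k : Nat) : Int) :=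
  (Int.natCast_shiftRight m k).symm

theorem loop_eq (m : Nat) : ∀ acc : List Char, opnameLoop (m : Int) acc = acc ++ lowD m := by
  induction m using Nat.strong_induction_on with
  | _ m ih =>
    intro acc
    rw [opnameLoop, lowD]
    by_cases h : m = 0
    · subst h; simp
    · have hp : (0 : Int) < (m : Int) := by exact_mod_cast Nat.pos_of_ne_zero h
      rw [dif_pos hp, dif_neg h, pvShiftCast, Nat.shiftRight_eq_div_pow,
        ih (m / 2 ^ 5) (Nat.div_lt_self (Nat.pos_of_ne_zero h) (by norm_num)),
        pvBandToNat]
      simp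

theorem pvDigitCast (m i : Nat) :
    (PySem.Int.band ((m : Int) >>> (5 * i)) 31).toNat = m / 32 ^ i % 32 := by
  rw [pvShiftCast, pvBandToNat, Nat.shiftRight_eq_div_pow, pow_mul]
  norm_num

theorem range_eq : ∀ (n m : Nat), 32 ^ n ≤ m → m < 32 ^ (n + 1) →
    lowD m = (List.range (n + 1)).map (fun i => Char.ofNat (m / 32 ^ i % 32 + 96)) := by
  intro n
  induction n with
  | zero =>
    intro m h1 h2
    simp at h1 h2
    rw [lowD, dif_neg (by omega)]
    rw [lowD, dif_pos (by omega)]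
    simp [Nat.mod_eq_of_lt h2]
  | succ n ih =>
    intro m h1 h2
    have hm0 : m ≠ 0 := by
      have : 0 < 32 ^ (n + 1) := Nat.pow_pos (a := 32) (by norm_num)
      omega
    rw [lowD, dif_neg hm0]
    have hd1 : 32 ^ n ≤ m / 32 := by
      rw [Nat.le_div_iff_mul_le (by norm_num)]
      calc 32 ^ n * 32 = 32 ^ (n + 1) := by ring
        _ ≤ m := h1
    have hd2 : m / 32 < 32 ^ (n + 1) := by
      rw [Nat.div_lt_iff_lt_mul (by norm_num)]
      calc m < 32 ^ (n + 1 + 1) := h2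
        _ = 32 ^ (n + 1) * 32 := by ring
    rw [ih (m / 32) hd1 hd2]
    conv_rhs => rw [List.range_succ_eq_map, List.map_cons, List.map_map]
    congr 1
    · norm_num
    apply List.map_congr_left
    intro i _
    simp only [Function.comp_apply]
    have h32 : m / 32 / 32 ^ i = m / 32 ^ (i + 1) := by
      rw [Nat.div_div_eq_div_mul, ← pow_succ']
    rw [h32]

theorem pow32 (k : Nat) : (32 : Nat) ^ k = 2 ^ (5 * k) := by
  rw [pow_mul]; norm_num

theorem pos_case (m : Nat) (hm : 0 < m) :
    (opnameLoop ((m : Nat) : Int) []).reverse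
      = (List.range ((PySem.Int.bitLength ((m : Nat) : Int) + 4) / 5)).reverse.map
          (fun i => Char.ofNat ((PySem.Int.band (((m : Nat) : Int) >>> (5 * i : Nat)) 31).toNat + 96)) := by
  have hub : m < 2 ^ PySem.Int.bitLength ((m : Nat) : Int) := by
    simpa using PySem.Int.lt_two_pow_bitLength ((m : Nat) : Int)
  have hlb : 2 ^ (PySem.Int.bitLength ((m : Nat) : Int) - 1) ≤ m := by
    simpa using PySem.Int.two_pow_bitLength_le ((m : Nat) : Int) (by exact_mod_cast hm.ne')
  set s := PySem.Int.bitLength ((m : Nat) : Int) with hs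
  have hs1 : 1 ≤ s := by
    rcases Nat.eq_zero_or_pos s with h0 | h1
    · rw [h0] at hub; omega
    · exact h1
  set n := (s + 4) / 5 with hn
  have hn1 : 1 ≤ n := by omega
  have hub' : m < 32 ^ n := by
    rw [pow32]
    exact lt_of_lt_of_le hub (Nat.pow_le_pow_right (by norm_num) (by omega))
  have hlb' : 32 ^ (n - 1) ≤ m := by
    rw [pow32]
    exact le_trans (Nat.pow_le_pow_right (by norm_num) (by omega)) hlb
  have hlow : lowD m = (List.range n).map (fun i => Char.ofNat (m / 32 ^ i % 32 + 96)) := by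
    have := range_eq (n - 1) m hlb' (by rwa [Nat.sub_add_cancel hn1])
    rwa [Nat.sub_add_cancel hn1] at this
  rw [loop_eq m [], List.nil_append, hlow, List.map_reverse]
  congr 1
  apply List.map_congr_left
  intro i _
  rw [pvDigitCast]

-- ===== VERDICT (by name: the statement is the Claim_ definition above) =====
theorem opname_spec : Claim_equal_opname := by
  intro value _
  unfold Spec_opname opname opname_alt
  simp only []
  by_cases h : value >>> (5 : Nat) ≤ 0
  · rw [if_pos h, opnameLoop, dif_neg (by omega)]
    rfl
  · rw [if_neg h]
    have hcast : value >>> (5 : Nat) = (((value >>> (5 : Nat)).toNat : Nat) : Int) := by omega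
    rw [hcast]
    exact congrArg String.mk (pos_case (value >>> (5 : Nat)).toNat (by omega))
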